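-- pv_equiv track=rewrite | github.com/ramanathanlab/distllm | distllm/embed/datasets/jsonl_sentence_chunks.py | sentences_to_buffers
-- ===== SOURCE A (Python) =====
-- def sentences_to_buffers(split: list[str], buffer_size: int) -> list[str]:
--     """Group split into buffers."""
--     buffers = []
--     for i in range(len(split)):
--         combined = ''.join(
--             split[j]
--             for j in range(
--                 max(0, i - buffer_size),
--                 min(i + 1 + buffer_size, len(split)),
--             )
--         )
--         buffers.append(combined)
--     return buffers
-- ===== SOURCE B (Python) =====
-- def sentences_to_buffers(split: list[str], buffer_size: int) -> list[str]:
--     """Group split into buffers."""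
--     offs = [0]
--     for s in split:
--         offs.append(offs[-1] + len(s))
--     whole = ''.join(split)
--     n = len(split)
--     buffers = []
--     for i in range(n):
--         lo = min(max(0, i - buffer_size), n)
--         hi = max(min(i + 1 + buffer_size, n), 0)
--         buffers.append(whole[offs[lo]:offs[hi]])
--     return buffers
-- ===== Notes on version B (the rewrite author's own statement) =====
-- stated objective: alternative
-- what changed: B joins the whole list once and builds a prefix-offset table, then emits each buffer as a single slice of the joined string instead of re-joining every overlapping window.
import Mathlib
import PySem

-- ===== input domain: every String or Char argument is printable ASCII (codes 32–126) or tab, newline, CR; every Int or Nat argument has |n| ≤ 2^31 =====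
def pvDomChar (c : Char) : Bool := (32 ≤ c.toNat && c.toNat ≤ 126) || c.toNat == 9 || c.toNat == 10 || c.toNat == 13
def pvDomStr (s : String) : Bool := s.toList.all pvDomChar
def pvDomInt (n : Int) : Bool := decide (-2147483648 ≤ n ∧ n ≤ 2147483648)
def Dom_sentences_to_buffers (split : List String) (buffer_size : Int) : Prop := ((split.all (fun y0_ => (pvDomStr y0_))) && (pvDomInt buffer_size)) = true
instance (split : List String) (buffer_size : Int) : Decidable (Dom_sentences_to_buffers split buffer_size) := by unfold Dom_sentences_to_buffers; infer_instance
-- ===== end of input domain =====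

-- B replaces A's per-window piecewise re-join by one whole-string join plus a
-- prefix-offset table and a single slice per window (objective: alternative).

-- ===== PORT A =====
-- Literal port of A: for each i, join split[j] for j in range(max(0,i-bs), min(i+1+bs, len)).
-- The inner indices j always satisfy 0 ≤ j < len(split), so split[j] never raises;
-- pyGetD's default "" is unreachable.
def sentences_to_buffers (split : List String) (buffer_size : Int) : List String :=
  (PySem.List.pyRange 0 (PySem.List.len split) 1).foldl
    (fun buffers i =>
      let combined := PySem.Str.join ""
        ((PySem.List.pyRange (max 0 (i - buffer_size))
            (min (i + 1 + buffer_size) (PySem.List.len split)) 1).map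
          (fun j => PySem.List.pyGetD split j ""))
      buffers ++ [combined])
    []

-- ===== PORT B =====
-- Literal port of Source B: build offs by appending offs[-1] + len(s), join once, slice per i.
-- offs is never empty, so offs[-1] never raises; indices into offs are clamped to [0, n],
-- so pyGetD's default 0 is unreachable.
def sentences_to_buffers_alt (split : List String) (buffer_size : Int) : List String :=
  let offs := split.foldl
    (fun offs s => offs ++ [PySem.List.pyGetD offs (-1) 0 + PySem.Str.len s]) [0]
  let whole := PySem.Str.join "" split
  let n := PySem.List.len split
  (PySem.List.pyRange 0 n 1).foldl
    (fun buffers i =>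
      let lo := min (max 0 (i - buffer_size)) n
      let hi := max (min (i + 1 + buffer_size) n) 0
      buffers ++ [PySem.Str.slice whole (some (PySem.List.pyGetD offs lo 0))
                                        (some (PySem.List.pyGetD offs hi 0))])
    []

-- ===== PRECONDITION & SPEC =====
def Spec_sentences_to_buffers (split : List String) (buffer_size : Int) (out : List String) : Prop := out = sentences_to_buffers_alt split buffer_size
instance (split : List String) (buffer_size : Int) (out : List String) : Decidable (Spec_sentences_to_buffers split buffer_size out) := by unfold Spec_sentences_to_buffers; infer_instance

-- ===== CLAIM (what is proved, stated in full; the proofs are below) =====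
def Claim_equal_sentences_to_buffers : Prop := ∀ (split : List String) (buffer_size : Int), Dom_sentences_to_buffers split buffer_size → Spec_sentences_to_buffers split buffer_size (sentences_to_buffers split buffer_size)

-- ===== LEMMAS AND PROOFS =====

-- sum of the lengths of the first k pieces (Nat-valued prefix offset)
def pvOffc (css : List (List Char)) (k : Nat) : Nat := ((css.take k).map List.length).sum

-- the tail of B's offs list, starting from running total c
def pvPartials (ys : List String) (c : Int) : List Int :=
  match ys with
  | [] => []
  | y :: ys => (c + PySem.Str.len y) :: pvPartials ys (c + PySem.Str.len y)

lemma pvOffc_nil (k : Nat) : pvOffc [] k = 0 := by simp [pvOffc]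

lemma pvOffc_zero (css : List (List Char)) : pvOffc css 0 = 0 := by simp [pvOffc]

lemma pvOffc_cons_succ (c : List Char) (cs : List (List Char)) (k : Nat) :
    pvOffc (c :: cs) (k + 1) = c.length + pvOffc cs k := by
  simp [pvOffc, List.take_succ_cons]

lemma pvOffc_clamp (css : List (List Char)) (k : Nat) :
    pvOffc css (min k css.length) = pvOffc css k := by
  unfold pvOffc
  rcases Nat.le_total k css.length with h | h
  · rw [Nat.min_eq_left h]
  · rw [Nat.min_eq_right h, List.take_of_length_le h, List.take_length]

lemma joinNil (css : List (List Char)) : PySem.Chars.join [] css = css.flatten := by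
  induction css with
  | nil => exact PySem.Chars.join_nil []
  | cons c cs ih =>
    cases cs with
    | nil => simp [PySem.Chars.join_singleton]
    | cons d ds =>
      rw [PySem.Chars.join_cons_cons, ih]
      simp

lemma pvLen_partials (ys : List String) (c : Int) : (pvPartials ys c).length = ys.length := by
  induction ys generalizing c with
  | nil => rfl
  | cons y ys ih => simp [pvPartials, ih]

lemma pvPartials_getElem (ys : List String) (c : Int) (k : Nat) (h : k < ys.length) :
    (pvPartials ys c)[k]'(by rw [pvLen_partials]; exact h) =
      c + (pvOffc (ys.map String.toList) (k + 1) : Int) := by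
  induction ys generalizing c k with
  | nil => simp at h
  | cons y ys ih =>
    cases k with
    | zero =>
      simp [pvPartials, pvOffc_cons_succ, pvOffc_zero, PySem.Str.len]
    | succ k =>
      have hk : k < ys.length := by simpa using h
      have := ih (c + PySem.Str.len y) k hk
      simp only [pvPartials, List.getElem_cons_succ, List.map_cons]
      rw [this, pvOffc_cons_succ]
      simp only [PySem.Str.len]
      push_cast
      ring

lemma pvFoldl_offs (ys : List String) (acc : List Int) (c : Int) (h : acc ≠ [])
    (hl : acc.getLast h = c) :
    ys.foldl (fun offs s => offs ++ [PySem.List.pyGetD offs (-1) 0 + PySem.Str.len s]) acc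
      = acc ++ pvPartials ys c := by
  induction ys generalizing acc c with
  | nil => simp [pvPartials]
  | cons y ys ih =>
    simp only [List.foldl_cons]
    rw [PySem.List.pyGetD_neg_one acc 0 h, hl]
    rw [ih (acc ++ [c + PySem.Str.len y]) (c + PySem.Str.len y) (by simp)
        (by simp)]
    simp [pvPartials]

lemma pvConsGet (split : List String) (k : Nat) (h : k ≤ split.length) :
    ((0 : Int) :: pvPartials split 0)[k]'(by simp [pvLen_partials]; omega)
      = (pvOffc (split.map String.toList) k : Int) := by
  cases k with
  | zero => simp [pvOffc_zero]
  | succ k' =>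
    have hk' : k' < split.length := by omega
    simp only [List.getElem_cons_succ]
    rw [pvPartials_getElem split 0 k' hk']
    simp

lemma pvOffs_get (split : List String) (k : Int) (h0 : 0 ≤ k)
    (h1 : k ≤ (split.length : Int)) :
    PySem.List.pyGetD
      (split.foldl (fun offs s => offs ++ [PySem.List.pyGetD offs (-1) 0 + PySem.Str.len s]) [0])
      k 0 = (pvOffc (split.map String.toList) k.toNat : Int) := by
  rw [pvFoldl_offs split [0] 0 (by simp) (by simp)]
  have hlen : ((0 : Int) :: pvPartials split 0).length = split.length + 1 := by
    simp [pvLen_partials]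
  rw [show ([(0 : Int)] ++ pvPartials split 0) = (0 : Int) :: pvPartials split 0 from rfl]
  rw [PySem.List.pyGetD_eq_getElem _ _ h0 (by rw [hlen]; push_cast; omega)]
  exact pvConsGet split k.toNat (by omega)

lemma pvFlatten_take (css : List (List Char)) (b : Nat) :
    (css.flatten).take (pvOffc css b) = (css.take b).flatten := by
  induction css generalizing b with
  | nil => simp [pvOffc_nil]
  | cons c cs ih =>
    cases b with
    | zero => simp [pvOffc_zero]
    | succ b =>
      rw [pvOffc_cons_succ]
      simp only [List.flatten_cons, List.take_succ_cons]
      rw [List.take_append, List.take_of_length_le (Nat.le_add_right _ _),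
        Nat.add_sub_cancel_left, ih]

lemma pvFlatten_slice (css : List (List Char)) (a b : Nat) :
    ((css.flatten).drop (pvOffc css a)).take (pvOffc css b - pvOffc css a)
      = ((css.drop a).take (b - a)).flatten := by
  induction css generalizing a b with
  | nil => simp [pvOffc_nil]
  | cons c cs ih =>
    cases a with
    | zero =>
      simp only [pvOffc_zero, List.drop_zero, Nat.sub_zero]
      exact pvFlatten_take (c :: cs) b
    | succ a =>
      cases b with
      | zero =>
        simp [pvOffc_zero]
      | succ b =>
        rw [pvOffc_cons_succ, pvOffc_cons_succ]
        simp only [List.flatten_cons, List.drop_succ_cons]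
        rw [List.drop_append, List.drop_of_length_le (Nat.le_add_right _ _),
          Nat.add_sub_cancel_left, List.nil_append]
        have : c.length + pvOffc cs b - (c.length + pvOffc cs a) = pvOffc cs b - pvOffc cs a := by
          omega
        rw [this, ih]
        simp

lemma pvRangeMap (split : List String) (a m : Nat) (h : a + m ≤ split.length) :
    (List.range m).map (fun k => split.getD (a + k) "") = (split.drop a).take m := by
  apply List.ext_getElem
  · simp; omega
  · intro k h1 h2
    have hk : k < m := by simpa using h1
    have hak : a + k < split.length := by omega
    simp [List.getD_eq_getElem?_getD, List.getElem?_eq_getElem hak]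

lemma pvSegment (split : List String) (a b : Int) (h0 : 0 ≤ a) (h1 : b ≤ (split.length : Int)) :
    (PySem.List.pyRange a b 1).map (fun j => PySem.List.pyGetD split j "")
      = (split.drop a.toNat).take (b.toNat - a.toNat) := by
  rcases le_or_gt b a with hba | hab
  · rw [PySem.List.pyRange_one_eq_nil hba]
    have : b.toNat - a.toNat = 0 := by omega
    simp [this]
  · rw [PySem.List.pyRange_one]
    rw [List.map_map]
    have hm : ((b - a).toNat : Int) = b - a := by omega
    have hcomp : ((fun j => PySem.List.pyGetD split j "") ∘ fun k : Nat => a + (k : Int))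
        = fun k : Nat => split.getD (a.toNat + k) "" := by
      funext k
      have h2 : a + (k : Int) = ((a.toNat + k : Nat) : Int) := by omega
      simp only [Function.comp_apply]
      rw [h2, PySem.List.pyGetD_natCast]
    rw [hcomp]
    have hsub : (b - a).toNat = b.toNat - a.toNat := by omega
    rcases le_or_gt b.toNat split.length with hble | hbgt
    · rw [hsub]
      exact pvRangeMap split a.toNat (b.toNat - a.toNat) (by omega)
    · exfalso; omega

-- the per-index equality: A's window join = B's slice of the whole join
lemma pvElem (split : List String) (bs i : Int) (h0 : 0 ≤ i) (h1 : i < (split.length : Int)) :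
    PySem.Str.join ""
      ((PySem.List.pyRange (max 0 (i - bs)) (min (i + 1 + bs) (split.length : Int)) 1).map
        (fun j => PySem.List.pyGetD split j ""))
    = PySem.Str.slice (PySem.Str.join "" split)
        (some (PySem.List.pyGetD
          (split.foldl (fun offs s => offs ++ [PySem.List.pyGetD offs (-1) 0 + PySem.Str.len s]) [0])
          (min (max 0 (i - bs)) (split.length : Int)) 0))
        (some (PySem.List.pyGetD
          (split.foldl (fun offs s => offs ++ [PySem.List.pyGetD offs (-1) 0 + PySem.Str.len s]) [0])
          (max (min (i + 1 + bs) (split.length : Int)) 0) 0)) := by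
  set nI : Int := (split.length : Int) with hn
  set a : Int := max 0 (i - bs) with ha
  set b : Int := min (i + 1 + bs) nI with hb
  have ha0 : 0 ≤ a := le_max_left _ _
  have hbn : b ≤ nI := min_le_right _ _
  have hlo0 : 0 ≤ min a nI := le_min ha0 (by omega)
  have hlon : min a nI ≤ nI := min_le_right _ _
  have hhi0 : 0 ≤ max b 0 := le_max_right _ _
  have hhin : max b 0 ≤ nI := max_le hbn (by omega)
  rw [pvOffs_get split _ hlo0 hlon, pvOffs_get split _ hhi0 hhin]
  apply String.ext
  simp only [PySem.Str.toList_slice, PySem.Str.toList_join]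
  have hcss : ("".toList : List Char) = [] := rfl
  rw [hcss]
  simp only [joinNil]
  unfold PySem.Chars.slice
  rw [PySem.List.slice_toNat _ (by positivity) (by positivity)]
  simp only [Int.toNat_natCast]
  set css : List (List Char) := split.map String.toList with hcssdef
  have hlen : css.length = split.length := by simp [hcssdef]
  have hloN : (min a nI).toNat = min a.toNat css.length := by rw [hlen]; omega
  have hhiN : (max b 0).toNat = b.toNat := by omega
  rw [hloN, hhiN, pvOffc_clamp]
  rw [pvSegment split a b ha0 hbn]
  rw [List.map_take, List.map_drop]
  exact (pvFlatten_slice css a.toNat b.toNat).symm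

-- ===== VERDICT (by name: the statement is the Claim_ definition above) =====
theorem sentences_to_buffers_spec : Claim_equal_sentences_to_buffers := by
  intro split buffer_size _dom
  unfold Spec_sentences_to_buffers sentences_to_buffers sentences_to_buffers_alt
  simp only [PySem.List.foldl_append_singleton_eq_map, List.nil_append, PySem.List.len_eq]
  apply List.map_congr_left
  intro i hi
  rw [PySem.List.mem_pyRange_one] at hi
  exact pvElem split buffer_size i hi.1 hi.2
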